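-- pv_equiv track=rewrite | github.com/rohanddave/FAI_Assignment1 | hw1.py | calculateConflictPenalty
-- ===== SOURCE A (Python) =====
-- def calculateConflictPenalty(grid):
--     rows = len(grid)
--     cols = len(grid[0])
--     conflicts = 0
--
--     for i in range(rows):
--         for j in range(cols):
--             current_cell = grid[i][j]
--
--             if current_cell == -1:
--                 continue
--
--             # Check for adjacent conflicts (4-neighborhood)
--             neighbors = [(1, 0), (-1, 0), (0, 1), (0, -1)]
--             for neighbor in neighbors:
--                 x, y = i + neighbor[0], j + neighbor[1]
--                 if 0 <= x < rows and 0 <= y < cols and grid[x][y] == current_cell: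
--                     conflicts += 1
--
--     return conflicts // 2  # Each conflict is counted twice, so divide by 2
-- ===== SOURCE B (Python) =====
-- def calculateConflictPenalty(grid):
--     cols = len(grid[0])
--     total = 0
--
--     # Horizontal pass: compare each cell with its right neighbour.
--     for row in grid:
--         for j in range(cols - 1):
--             if row[j] != -1 and row[j] == row[j + 1]:
--                 total += 1
--
--     # Vertical pass: compare each cell with the cell below it.
--     for upper, lower in zip(grid, grid[1:]):
--         for j in range(cols):
--             if upper[j] != -1 and upper[j] == lower[j]:
--                 total += 1
--
--     return total
-- ===== Notes on version B (the rewrite author's own statement) =====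
-- stated objective: faster
-- what changed: Replaces the per-cell 4-neighbour scan with its //2 double-counting correction by two direct passes (row-wise right-neighbour comparisons, then zip of consecutive rows for below-neighbour comparisons) that count each adjacent equal pair exactly once: half the comparisons, no bounds tests and no division.
import Mathlib
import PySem

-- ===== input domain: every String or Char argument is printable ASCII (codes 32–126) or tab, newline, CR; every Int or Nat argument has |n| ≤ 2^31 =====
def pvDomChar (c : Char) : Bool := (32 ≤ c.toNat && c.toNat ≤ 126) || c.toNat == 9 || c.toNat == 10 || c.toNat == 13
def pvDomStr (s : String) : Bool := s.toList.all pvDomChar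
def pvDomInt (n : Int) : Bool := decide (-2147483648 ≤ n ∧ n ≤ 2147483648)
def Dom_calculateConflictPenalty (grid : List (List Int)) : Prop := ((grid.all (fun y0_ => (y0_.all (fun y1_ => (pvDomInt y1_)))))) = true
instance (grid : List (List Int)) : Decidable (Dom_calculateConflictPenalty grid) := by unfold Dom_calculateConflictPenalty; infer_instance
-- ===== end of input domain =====

-- B replaces A's per-cell 4-neighbour scan (each adjacency counted twice, then // 2) by two
-- direct passes — row-wise right-neighbour comparisons, then consecutive-row comparisons via
-- zip — counting each adjacent equal pair once, with no division (measured faster in a timing run).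

-- ===== PORT A =====
-- A-side helpers: the three nested loop bodies of A, named so the proofs can refer to them.
def pvANb (grid : List (List Int)) (rows cols i j current : Int)
    (conflicts : Int) (nb : Int × Int) : Int :=
  let x := i + nb.1
  let y := j + nb.2
  if 0 ≤ x ∧ x < rows ∧ 0 ≤ y ∧ y < cols ∧
      PySem.List.pyGetD (PySem.List.pyGetD grid x []) y 0 = current
  then conflicts + 1 else conflicts

def pvACell (grid : List (List Int)) (rows cols i : Int) (conflicts : Int) (j : Int) : Int :=
  let currentCell := PySem.List.pyGetD (PySem.List.pyGetD grid i []) j 0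
  if currentCell = -1 then conflicts
  else ([((1:Int), (0:Int)), (-1, 0), (0, 1), (0, -1)]).foldl
        (pvANb grid rows cols i j currentCell) conflicts

def pvARow (grid : List (List Int)) (rows cols : Int) (conflicts : Int) (i : Int) : Int :=
  (PySem.List.pyRange 0 cols 1).foldl (pvACell grid rows cols i) conflicts

def calculateConflictPenalty (grid : List (List Int)) : Int :=
  let rows : Int := PySem.List.len grid
  let cols : Int := PySem.List.len (PySem.List.pyGetD grid 0 [])
  let conflicts : Int := (PySem.List.pyRange 0 rows 1).foldl (pvARow grid rows cols) 0
  PySem.Int.floordiv conflicts 2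

-- ===== PORT B =====
-- B-side helpers: the two loop bodies of B.
def pvBRow (cols : Int) (total : Int) (row : List Int) : Int :=
  (PySem.List.pyRange 0 (cols - 1) 1).foldl (fun total j =>
    if PySem.List.pyGetD row j 0 ≠ -1 ∧
        PySem.List.pyGetD row j 0 = PySem.List.pyGetD row (j + 1) 0
    then total + 1 else total) total

def pvBPair (cols : Int) (total : Int) (ul : List Int × List Int) : Int :=
  (PySem.List.pyRange 0 cols 1).foldl (fun total j =>
    if PySem.List.pyGetD ul.1 j 0 ≠ -1 ∧
        PySem.List.pyGetD ul.1 j 0 = PySem.List.pyGetD ul.2 j 0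
    then total + 1 else total) total

def calculateConflictPenalty_alt (grid : List (List Int)) : Int :=
  let cols : Int := PySem.List.len (PySem.List.pyGetD grid 0 [])
  let total1 : Int := grid.foldl (pvBRow cols) 0
  let total2 : Int := (grid.zip (PySem.List.slice grid (some 1) none)).foldl (pvBPair cols) 0
  total1 + total2

-- ===== PRECONDITION & SPEC =====
-- Pre_ excludes exactly the inputs where Python A raises IndexError: the empty grid
-- (grid[0]) and grids with a row shorter than len(grid[0]) (grid[i][j] for j < cols).
def Pre_calculateConflictPenalty (grid : List (List Int)) : Prop :=
  grid ≠ [] ∧ ∀ row ∈ grid, (grid.getD 0 []).length ≤ row.length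
instance (grid : List (List Int)) : Decidable (Pre_calculateConflictPenalty grid) := by
  unfold Pre_calculateConflictPenalty; infer_instance

def pvWitness_calculateConflictPenalty : List (List Int) := [[1, 2], [2, 2]]

def Spec_calculateConflictPenalty (grid : List (List Int)) (out : Int) : Prop :=
  out = calculateConflictPenalty_alt grid
instance (grid : List (List Int)) (out : Int) : Decidable (Spec_calculateConflictPenalty grid out) := by
  unfold Spec_calculateConflictPenalty; infer_instance

-- ===== CLAIM (what is proved, stated in full; the proofs are below) =====
def Claim_equal_calculateConflictPenalty : Prop := ∀ (grid : List (List Int)), Dom_calculateConflictPenalty grid → Pre_calculateConflictPenalty grid → Spec_calculateConflictPenalty grid (calculateConflictPenalty grid)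

-- ===== LEMMAS AND PROOFS =====

-- Nat-indexed cell access (out-of-range reads the default 0, which the proofs never rely on
-- for in-range cells; all index arithmetic is done on Nat here).
def pvG (grid : List (List Int)) (i j : Nat) : Int := (grid.getD i []).getD j 0

-- The two indicators B counts: equal non-(-1) pair with the right / the below neighbour.
def pvH (grid : List (List Int)) (i j : Nat) : Int :=
  if pvG grid i j ≠ -1 ∧ pvG grid i j = pvG grid i (j + 1) then 1 else 0
def pvV (grid : List (List Int)) (i j : Nat) : Int :=
  if pvG grid i j ≠ -1 ∧ pvG grid i j = pvG grid (i + 1) j then 1 else 0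

-- The four directional indicators A counts at a cell (guards folded in).
def pvD (grid : List (List Int)) (R i j : Nat) : Int :=
  if i + 1 < R ∧ pvG grid i j ≠ -1 ∧ pvG grid (i + 1) j = pvG grid i j then 1 else 0
def pvU (grid : List (List Int)) (i j : Nat) : Int :=
  if 1 ≤ i ∧ pvG grid i j ≠ -1 ∧ pvG grid (i - 1) j = pvG grid i j then 1 else 0
def pvRt (grid : List (List Int)) (C i j : Nat) : Int :=
  if j + 1 < C ∧ pvG grid i j ≠ -1 ∧ pvG grid i (j + 1) = pvG grid i j then 1 else 0
def pvL (grid : List (List Int)) (i j : Nat) : Int :=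
  if 1 ≤ j ∧ pvG grid i j ≠ -1 ∧ pvG grid i (j - 1) = pvG grid i j then 1 else 0

-- Int-level value of A's neighbour-check / cell bodies.
def pvNbI (grid : List (List Int)) (rows cols i j dx dy : Int) : Int :=
  if 0 ≤ i + dx ∧ i + dx < rows ∧ 0 ≤ j + dy ∧ j + dy < cols ∧
      PySem.List.pyGetD (PySem.List.pyGetD grid (i + dx) []) (j + dy) 0 =
        PySem.List.pyGetD (PySem.List.pyGetD grid i []) j 0
  then 1 else 0

def pvCellI (grid : List (List Int)) (rows cols i j : Int) : Int :=
  if PySem.List.pyGetD (PySem.List.pyGetD grid i []) j 0 = -1 then 0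
  else pvNbI grid rows cols i j 1 0 + pvNbI grid rows cols i j (-1) 0
        + pvNbI grid rows cols i j 0 1 + pvNbI grid rows cols i j 0 (-1)

lemma pvACell_eq (grid : List (List Int)) (rows cols i : Int) (acc j : Int) :
    pvACell grid rows cols i acc j = acc + pvCellI grid rows cols i j := by
  unfold pvACell pvCellI pvANb pvNbI
  by_cases hc : PySem.List.pyGetD (PySem.List.pyGetD grid i []) j 0 = -1
  · simp [hc]
  · simp only [hc, if_false, List.foldl]
    split_ifs <;> ring
lemma pv_down (grid : List (List Int)) (R C i j : Nat) (hj : j < C)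
    (hm : pvG grid i j ≠ -1) :
    pvNbI grid (R : Int) (C : Int) (i : Int) (j : Int) 1 0 = pvD grid R i j := by
  have e1 : ((i : Int)) + 1 = ((i + 1 : Nat) : Int) := by push_cast; ring
  unfold pvNbI pvD pvG at *
  simp only [add_zero]
  rw [e1]
  simp only [PySem.List.pyGetD_natCast]
  split_ifs <;> omega

lemma pv_up (grid : List (List Int)) (R C i j : Nat) (hi : i < R) (hj : j < C)
    (hm : pvG grid i j ≠ -1) :
    pvNbI grid (R : Int) (C : Int) (i : Int) (j : Int) (-1) 0 = pvU grid i j := by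
  unfold pvNbI pvU pvG at *
  simp only [add_zero]
  by_cases h1 : 1 ≤ i
  · have f1 : ((i : Int)) + (-1) = ((i - 1 : Nat) : Int) := by omega
    rw [f1]
    simp only [PySem.List.pyGetD_natCast]
    split_ifs <;> omega
  · have f1 : ¬ (0 ≤ (i : Int) + (-1)) := by omega
    rw [if_neg (by tauto), if_neg (by omega)]

lemma pv_right (grid : List (List Int)) (R C i j : Nat) (hi : i < R)
    (hm : pvG grid i j ≠ -1) :
    pvNbI grid (R : Int) (C : Int) (i : Int) (j : Int) 0 1 = pvRt grid C i j := by
  have e2 : ((j : Int)) + 1 = ((j + 1 : Nat) : Int) := by push_cast; ring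
  unfold pvNbI pvRt pvG at *
  simp only [add_zero]
  rw [e2]
  simp only [PySem.List.pyGetD_natCast]
  split_ifs <;> omega

lemma pv_left (grid : List (List Int)) (R C i j : Nat) (hi : i < R) (hj : j < C)
    (hm : pvG grid i j ≠ -1) :
    pvNbI grid (R : Int) (C : Int) (i : Int) (j : Int) 0 (-1) = pvL grid i j := by
  unfold pvNbI pvL pvG at *
  simp only [add_zero]
  by_cases h1 : 1 ≤ j
  · have f1 : ((j : Int)) + (-1) = ((j - 1 : Nat) : Int) := by omega
    rw [f1]
    simp only [PySem.List.pyGetD_natCast]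
    split_ifs <;> omega
  · have f1 : ¬ (0 ≤ (j : Int) + (-1)) := by omega
    rw [if_neg (by tauto), if_neg (by omega)]

lemma pvCell_split (grid : List (List Int)) (R C i j : Nat) (hi : i < R) (hj : j < C) :
    pvCellI grid (R : Int) (C : Int) (i : Int) (j : Int) =
      pvD grid R i j + pvU grid i j + pvRt grid C i j + pvL grid i j := by
  by_cases hm : pvG grid i j = -1
  · have hm' : PySem.List.pyGetD (PySem.List.pyGetD grid (i : Int) []) (j : Int) 0 = -1 := by
      simpa [PySem.List.pyGetD_natCast, pvG] using hm
    rw [pvCellI, if_pos hm']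
    unfold pvD pvU pvRt pvL
    rw [if_neg (by tauto), if_neg (by tauto), if_neg (by tauto), if_neg (by tauto)]
    ring
  · have hm' : ¬ PySem.List.pyGetD (PySem.List.pyGetD grid (i : Int) []) (j : Int) 0 = -1 := by
      simpa [PySem.List.pyGetD_natCast, pvG] using hm
    rw [pvCellI, if_neg hm', pv_down grid R C i j hj hm, pv_up grid R C i j hi hj hm,
        pv_right grid R C i j hi hm, pv_left grid R C i j hi hj hm]
lemma pvSum_pvD (grid : List (List Int)) (R : Nat) (j : Nat) :
    ∑ i ∈ Finset.range R, pvD grid R i j = ∑ i ∈ Finset.range (R - 1), pvV grid i j := by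
  cases R with
  | zero => simp
  | succ m =>
    rw [Finset.sum_range_succ]
    have hz : pvD grid (m + 1) m j = 0 := by
      unfold pvD; rw [if_neg (by omega)]
    rw [hz, add_zero, Nat.add_sub_cancel]
    refine Finset.sum_congr rfl ?_
    intro i hi
    have hi' : i < m := Finset.mem_range.mp hi
    unfold pvD pvV
    split_ifs <;> omega

lemma pvSum_pvU (grid : List (List Int)) (R : Nat) (j : Nat) :
    ∑ i ∈ Finset.range R, pvU grid i j = ∑ i ∈ Finset.range (R - 1), pvV grid i j := by
  cases R with
  | zero => simp
  | succ m =>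
    rw [Finset.sum_range_succ']
    have hz : pvU grid 0 j = 0 := by
      unfold pvU; rw [if_neg (by omega)]
    rw [hz, add_zero, Nat.add_sub_cancel]
    refine Finset.sum_congr rfl ?_
    intro i hi
    unfold pvU pvV
    simp only [Nat.add_sub_cancel]
    split_ifs <;> omega

lemma pvSum_pvRt (grid : List (List Int)) (C : Nat) (i : Nat) :
    ∑ j ∈ Finset.range C, pvRt grid C i j = ∑ j ∈ Finset.range (C - 1), pvH grid i j := by
  cases C with
  | zero => simp
  | succ m =>
    rw [Finset.sum_range_succ]
    have hz : pvRt grid (m + 1) i m = 0 := by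
      unfold pvRt; rw [if_neg (by omega)]
    rw [hz, add_zero, Nat.add_sub_cancel]
    refine Finset.sum_congr rfl ?_
    intro j hj
    have hj' : j < m := Finset.mem_range.mp hj
    unfold pvRt pvH
    split_ifs <;> omega

lemma pvSum_pvL (grid : List (List Int)) (C : Nat) (i : Nat) :
    ∑ j ∈ Finset.range C, pvL grid i j = ∑ j ∈ Finset.range (C - 1), pvH grid i j := by
  cases C with
  | zero => simp
  | succ m =>
    rw [Finset.sum_range_succ']
    have hz : pvL grid i 0 = 0 := by
      unfold pvL; rw [if_neg (by omega)]
    rw [hz, add_zero, Nat.add_sub_cancel]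
    refine Finset.sum_congr rfl ?_
    intro j hj
    unfold pvL pvH
    simp only [Nat.add_sub_cancel]
    split_ifs <;> omega
lemma pvSum_pyRange (n : Nat) (f : Int → Int) :
    ((PySem.List.pyRange 0 (n : Int) 1).map f).sum = ∑ k ∈ Finset.range n, f (k : Int) := by
  rw [PySem.List.pyRange_one]
  simp [List.map_map]
  rfl

lemma pvSum_map_getD (l : List (List Int)) (f : List Int → Int) :
    (l.map f).sum = ∑ i ∈ Finset.range l.length, f (l.getD i []) := by
  induction l with
  | nil => simp
  | cons a rest ih =>
    simp only [List.map_cons, List.sum_cons, List.length_cons, Finset.sum_range_succ']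
    simp [List.getD, ih]
    ring

lemma pvSum_zip_tail (l : List (List Int)) (v : List Int × List Int → Int) :
    ((l.zip l.tail).map v).sum =
      ∑ i ∈ Finset.range (l.length - 1), v (l.getD i [], l.getD (i + 1) []) := by
  induction l with
  | nil => simp
  | cons a rest ih =>
    cases rest with
    | nil => simp
    | cons b t =>
      simp only [List.tail_cons, List.zip_cons_cons, List.map_cons, List.sum_cons]
      rw [show (b :: t).tail = t from rfl] at ih
      rw [ih]
      simp only [List.length_cons, Nat.add_sub_cancel, Finset.sum_range_succ']
      simp [List.getD]
      ring
lemma pvSum_pyRange_pred (C : Nat) (f : Int → Int) :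
    ((PySem.List.pyRange 0 ((C : Int) - 1) 1).map f).sum = ∑ k ∈ Finset.range (C - 1), f (k : Int) := by
  cases C with
  | zero => rw [PySem.List.pyRange_one_eq_nil (by norm_num)]; simp
  | succ m =>
    have e : ((m + 1 : Nat) : Int) - 1 = (m : Int) := by push_cast; ring
    rw [e, pvSum_pyRange, Nat.add_sub_cancel]

lemma pvA_char (grid : List (List Int)) :
    calculateConflictPenalty grid =
      PySem.Int.floordiv
        (∑ i ∈ Finset.range grid.length,
          ∑ j ∈ Finset.range (grid.getD 0 []).length,
            pvCellI grid (grid.length : Int) (((grid.getD 0 []).length : Nat) : Int)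
              (i : Int) (j : Int)) 2 := by
  unfold calculateConflictPenalty
  simp only [PySem.List.len_eq, PySem.List.pyGetD_zero]
  congr 1
  have hrow : ∀ (acc i : Int),
      pvARow grid (grid.length : Int) ((grid.getD 0 []).length : Int) acc i =
        acc + ((PySem.List.pyRange 0 ((grid.getD 0 []).length : Int) 1).map
                (pvCellI grid (grid.length : Int) ((grid.getD 0 []).length : Int) i)).sum := by
    intro acc i
    unfold pvARow
    rw [PySem.List.foldl_congr_mem _ _
          (fun acc j => acc + pvCellI grid (grid.length : Int) ((grid.getD 0 []).length : Int) i j) _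
          (fun acc x _ => pvACell_eq grid _ _ i acc x),
        PySem.List.foldl_add]
  rw [PySem.List.foldl_congr_mem _ _
        (fun acc i => acc + ((PySem.List.pyRange 0 ((grid.getD 0 []).length : Int) 1).map
          (pvCellI grid (grid.length : Int) ((grid.getD 0 []).length : Int) i)).sum) _
        (fun acc x _ => hrow acc x),
      PySem.List.foldl_add, zero_add, pvSum_pyRange]
  refine Finset.sum_congr rfl fun i _ => ?_
  rw [pvSum_pyRange]
lemma pv_if_pull (c : Prop) [Decidable c] (a : Int) :
    (if c then a + 1 else a) = a + (if c then (1:Int) else 0) := by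
  split_ifs <;> ring

lemma pvB_char (grid : List (List Int)) :
    calculateConflictPenalty_alt grid =
      (∑ i ∈ Finset.range grid.length,
        ∑ j ∈ Finset.range ((grid.getD 0 []).length - 1), pvH grid i j)
      + (∑ i ∈ Finset.range (grid.length - 1),
          ∑ j ∈ Finset.range (grid.getD 0 []).length, pvV grid i j) := by
  unfold calculateConflictPenalty_alt
  simp only [PySem.List.len_eq, PySem.List.pyGetD_zero, PySem.List.slice_from_one]
  congr 1
  · -- horizontal pass
    have h1 : ∀ (acc : Int) (row : List Int),
        pvBRow ((grid.getD 0 []).length : Int) acc row =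
          acc + ∑ j ∈ Finset.range ((grid.getD 0 []).length - 1),
            (if row.getD j 0 ≠ -1 ∧ row.getD j 0 = row.getD (j + 1) 0 then (1:Int) else 0) := by
      intro acc row
      unfold pvBRow
      rw [PySem.List.foldl_congr_mem _ _
            (fun total j => total + (if PySem.List.pyGetD row j 0 ≠ -1 ∧
              PySem.List.pyGetD row j 0 = PySem.List.pyGetD row (j + 1) 0 then (1:Int) else 0)) _
            (fun acc x _ => pv_if_pull _ acc),
          PySem.List.foldl_add, pvSum_pyRange_pred]
      congr 1
      refine Finset.sum_congr rfl fun j _ => ?_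
      have e2 : ((j : Nat) : Int) + 1 = ((j + 1 : Nat) : Int) := by push_cast; ring
      rw [e2]
      simp only [PySem.List.pyGetD_natCast]
    rw [PySem.List.foldl_congr_mem _ _
          (fun acc row => acc + ∑ j ∈ Finset.range ((grid.getD 0 []).length - 1),
            (if row.getD j 0 ≠ -1 ∧ row.getD j 0 = row.getD (j + 1) 0 then (1:Int) else 0)) _
          (fun acc x _ => h1 acc x),
        PySem.List.foldl_add, zero_add, pvSum_map_getD]
    refine Finset.sum_congr rfl fun i _ => Finset.sum_congr rfl fun j _ => ?_
    simp [pvH, pvG]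
  · -- vertical pass
    have h2 : ∀ (acc : Int) (ul : List Int × List Int),
        pvBPair ((grid.getD 0 []).length : Int) acc ul =
          acc + ∑ j ∈ Finset.range (grid.getD 0 []).length,
            (if ul.1.getD j 0 ≠ -1 ∧ ul.1.getD j 0 = ul.2.getD j 0 then (1:Int) else 0) := by
      intro acc ul
      unfold pvBPair
      rw [PySem.List.foldl_congr_mem _ _
            (fun total j => total + (if PySem.List.pyGetD ul.1 j 0 ≠ -1 ∧
              PySem.List.pyGetD ul.1 j 0 = PySem.List.pyGetD ul.2 j 0 then (1:Int) else 0)) _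
            (fun acc x _ => pv_if_pull _ acc),
          PySem.List.foldl_add, pvSum_pyRange]
      congr 1
      refine Finset.sum_congr rfl fun j _ => ?_
      simp only [PySem.List.pyGetD_natCast]
    rw [PySem.List.foldl_congr_mem _ _
          (fun acc ul => acc + ∑ j ∈ Finset.range (grid.getD 0 []).length,
            (if ul.1.getD j 0 ≠ -1 ∧ ul.1.getD j 0 = ul.2.getD j 0 then (1:Int) else 0)) _
          (fun acc x _ => h2 acc x),
        PySem.List.foldl_add, zero_add, pvSum_zip_tail]
    refine Finset.sum_congr rfl fun i _ => Finset.sum_congr rfl fun j _ => ?_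
    simp [pvV, pvG]
theorem pv_final (grid : List (List Int)) :
    calculateConflictPenalty grid = calculateConflictPenalty_alt grid := by
  rw [pvA_char, pvB_char]
  have hsplit : (∑ i ∈ Finset.range grid.length,
      ∑ j ∈ Finset.range (grid.getD 0 []).length,
        pvCellI grid (grid.length : Int) ((grid.getD 0 []).length : Int) (i : Int) (j : Int))
      = (∑ i ∈ Finset.range grid.length, ∑ j ∈ Finset.range (grid.getD 0 []).length,
          pvD grid grid.length i j)
        + (∑ i ∈ Finset.range grid.length, ∑ j ∈ Finset.range (grid.getD 0 []).length,
            pvU grid i j)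
        + (∑ i ∈ Finset.range grid.length, ∑ j ∈ Finset.range (grid.getD 0 []).length,
            pvRt grid (grid.getD 0 []).length i j)
        + (∑ i ∈ Finset.range grid.length, ∑ j ∈ Finset.range (grid.getD 0 []).length,
            pvL grid i j) := by
    rw [← Finset.sum_add_distrib, ← Finset.sum_add_distrib, ← Finset.sum_add_distrib]
    refine Finset.sum_congr rfl fun i hi => ?_
    rw [← Finset.sum_add_distrib, ← Finset.sum_add_distrib, ← Finset.sum_add_distrib]
    refine Finset.sum_congr rfl fun j hj => ?_
    exact pvCell_split grid _ _ i j (Finset.mem_range.mp hi) (Finset.mem_range.mp hj)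
  rw [hsplit]
  have hD : (∑ i ∈ Finset.range grid.length, ∑ j ∈ Finset.range (grid.getD 0 []).length,
      pvD grid grid.length i j)
      = ∑ i ∈ Finset.range (grid.length - 1), ∑ j ∈ Finset.range (grid.getD 0 []).length,
          pvV grid i j := by
    rw [Finset.sum_comm]
    rw [show (∑ i ∈ Finset.range (grid.length - 1), ∑ j ∈ Finset.range (grid.getD 0 []).length,
        pvV grid i j) = ∑ j ∈ Finset.range (grid.getD 0 []).length,
          ∑ i ∈ Finset.range (grid.length - 1), pvV grid i j from Finset.sum_comm]
    exact Finset.sum_congr rfl fun j _ => pvSum_pvD grid _ j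
  have hU : (∑ i ∈ Finset.range grid.length, ∑ j ∈ Finset.range (grid.getD 0 []).length,
      pvU grid i j)
      = ∑ i ∈ Finset.range (grid.length - 1), ∑ j ∈ Finset.range (grid.getD 0 []).length,
          pvV grid i j := by
    rw [Finset.sum_comm]
    rw [show (∑ i ∈ Finset.range (grid.length - 1), ∑ j ∈ Finset.range (grid.getD 0 []).length,
        pvV grid i j) = ∑ j ∈ Finset.range (grid.getD 0 []).length,
          ∑ i ∈ Finset.range (grid.length - 1), pvV grid i j from Finset.sum_comm]
    exact Finset.sum_congr rfl fun j _ => pvSum_pvU grid _ j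
  have hRt : (∑ i ∈ Finset.range grid.length, ∑ j ∈ Finset.range (grid.getD 0 []).length,
      pvRt grid (grid.getD 0 []).length i j)
      = ∑ i ∈ Finset.range grid.length, ∑ j ∈ Finset.range ((grid.getD 0 []).length - 1),
          pvH grid i j :=
    Finset.sum_congr rfl fun i _ => pvSum_pvRt grid _ i
  have hL : (∑ i ∈ Finset.range grid.length, ∑ j ∈ Finset.range (grid.getD 0 []).length,
      pvL grid i j)
      = ∑ i ∈ Finset.range grid.length, ∑ j ∈ Finset.range ((grid.getD 0 []).length - 1),
          pvH grid i j :=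
    Finset.sum_congr rfl fun i _ => pvSum_pvL grid _ i
  rw [hD, hU, hRt, hL]
  rw [PySem.Int.floordiv_eq_ediv_of_pos (by norm_num)]
  omega

-- ===== VERDICT (by name: the statement is the Claim_ definition above) =====
theorem calculateConflictPenalty_spec : Claim_equal_calculateConflictPenalty := by
  intro grid _ _
  unfold Spec_calculateConflictPenalty
  exact pv_final grid
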